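-- pv_equiv track=rewrite | github.com/nhatanh20022005/TEST | MU_TOAN_PHAN.py | Cap_Kha_Nang_An
-- ===== SOURCE A (Python) =====
-- def Cap_Kha_Nang_An(niemtin):
--     counts = {}
--     for pos, tap in niemtin.items():
--         for v in tap:
--             if v != 0:
--                 counts[v] = counts.get(v, 0) + 1
--     for v, c in counts.items():
--         if c >= 2:
--             return True
--     return False
-- ===== SOURCE B (Python) =====
-- def Cap_Kha_Nang_An(niemtin):
--     vals = sorted(v for tap in niemtin.values() for v in tap if v != 0)
--     return any(a == b for a, b in zip(vals, vals[1:]))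
-- ===== Notes on version B (the rewrite author's own statement) =====
-- stated objective: alternative
-- what changed: Replaces A's incremental counter dict plus a rescan for a count >= 2 by sorting the flattened nonzero values and scanning adjacent pairs for an equal neighbour (sort-then-scan duplicate detection).
import Mathlib
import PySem

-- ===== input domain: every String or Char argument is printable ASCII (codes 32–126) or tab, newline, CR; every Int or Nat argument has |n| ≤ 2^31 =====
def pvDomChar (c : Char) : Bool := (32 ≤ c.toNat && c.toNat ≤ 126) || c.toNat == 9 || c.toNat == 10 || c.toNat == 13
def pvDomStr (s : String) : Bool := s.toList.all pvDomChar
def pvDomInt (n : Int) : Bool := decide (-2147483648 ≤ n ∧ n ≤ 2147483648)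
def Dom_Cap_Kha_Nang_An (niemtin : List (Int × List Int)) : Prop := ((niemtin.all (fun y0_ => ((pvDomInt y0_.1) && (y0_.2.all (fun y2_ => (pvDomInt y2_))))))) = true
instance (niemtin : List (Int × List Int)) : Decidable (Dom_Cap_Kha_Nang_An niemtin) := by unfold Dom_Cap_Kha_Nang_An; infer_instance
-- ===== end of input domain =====

-- B replaces A's incremental counter dict and count>=2 rescan by sorting the flattened
-- nonzero values and scanning adjacent pairs for an equal neighbour (alternative algorithm).

-- ===== PORT A =====
def Cap_Kha_Nang_An (niemtin : List (Int × List Int)) : Bool :=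
  let counts : PySem.Dict Int Int :=
    niemtin.foldl (fun cs p =>
      p.2.foldl (fun cs2 v => if v ≠ 0 then cs2.modify v 0 (· + 1) else cs2) cs)
      PySem.Dict.empty
  counts.items.any (fun q => decide (q.2 ≥ 2))

-- ===== PORT B =====
def Cap_Kha_Nang_An_alt (niemtin : List (Int × List Int)) : Bool :=
  let vals := PySem.List.sorted
    ((niemtin.map (·.2)).flatMap (fun tap => tap.filter (fun v => v ≠ 0)))
    (fun x => x) false
  (vals.zip (vals.drop 1)).any (fun p => p.1 == p.2)

-- ===== PRECONDITION & SPEC =====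
def Spec_Cap_Kha_Nang_An (niemtin : List (Int × List Int)) (out : Bool) : Prop := out = Cap_Kha_Nang_An_alt niemtin
instance (niemtin : List (Int × List Int)) (out : Bool) : Decidable (Spec_Cap_Kha_Nang_An niemtin out) := by unfold Spec_Cap_Kha_Nang_An; infer_instance

-- ===== CLAIM (what is proved, stated in full; the proofs are below) =====
def Claim_equal_Cap_Kha_Nang_An : Prop := ∀ (niemtin : List (Int × List Int)), Dom_Cap_Kha_Nang_An niemtin → Spec_Cap_Kha_Nang_An niemtin (Cap_Kha_Nang_An niemtin)

-- ===== LEMMAS AND PROOFS =====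

-- a nested per-sublist fold is the fold over the flattened list
theorem foldl_foldl_eq_foldl_flatMap {α β γ : Type} (f : α → List β) (g : γ → β → γ) :
    ∀ (l : List α) (init : γ),
      l.foldl (fun acc p => (f p).foldl g acc) init = (l.flatMap f).foldl g init := by
  intro l
  induction l with
  | nil => intro init; rfl
  | cons p t ih =>
    intro init
    simp [List.flatMap_cons, List.foldl_append, ih]

-- A's "some count ≥ 2" test over the counter is duplicate existence
theorem any_count_ge_two_eq (vals : List Int) :
    ((PySem.Set.ofList vals).any (fun k => decide ((vals.count k : Int) ≥ 2)))
      = decide (¬ vals.Nodup) := by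
  have hiff : ((PySem.Set.ofList vals).any (fun k => decide ((vals.count k : Int) ≥ 2)) = true)
      ↔ ¬ vals.Nodup := by
    rw [List.any_eq_true]
    constructor
    · rintro ⟨k, _, hk⟩ hnd
      have hk' : 2 ≤ vals.count k := by
        have := of_decide_eq_true hk
        exact_mod_cast this
      have := List.nodup_iff_count_le_one.mp hnd k
      omega
    · intro hnnd
      rcases (by simpa [List.nodup_iff_count_le_one] using hnnd : ∃ k, ¬ vals.count k ≤ 1)
        with ⟨k, hk⟩
      refine ⟨k, ?_, ?_⟩
      · have : k ∈ vals := List.count_pos_iff.mp (by omega)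
        exact (PySem.Set.mem_ofList ..).mpr this
      · exact decide_eq_true (by exact_mod_cast (by omega : 2 ≤ vals.count k))
  rw [Bool.eq_iff_iff, decide_eq_true_eq]
  exact hiff

-- on a ≤-sorted list, an adjacent equal pair exists iff the list has a duplicate
theorem adj_eq_of_sorted :
    ∀ (l : List Int), l.Pairwise (· ≤ ·) →
      ((l.zip (l.drop 1)).any (fun p => p.1 == p.2)) = decide (¬ l.Nodup) := by
  intro l
  induction l with
  | nil => intro _; simp
  | cons x t ih =>
    intro hp
    cases t with
    | nil => simp
    | cons y t2 =>
      have hp' := (List.pairwise_cons.mp hp).2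
      have hxy : x ≤ y := (List.pairwise_cons.mp hp).1 y (List.mem_cons_self ..)
      have iht := ih hp'
      by_cases hxyeq : x = y
      · subst hxyeq
        have : ¬ (x :: x :: t2).Nodup := by
          intro h
          exact (List.nodup_cons.mp h).1 (List.mem_cons_self ..)
        simp [this]
      · have hxlt : x < y := lt_of_le_of_ne hxy hxyeq
        have hxnot : x ∉ y :: t2 := by
          intro hmem
          have hle : ∀ z ∈ y :: t2, y ≤ z := by
            intro z hz
            rcases List.mem_cons.mp hz with rfl | hz'
            · exact le_refl _
            · exact (List.pairwise_cons.mp hp').1 z hz'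
          exact absurd (hle x hmem) (not_le.mpr hxlt)
        have hnd : (x :: y :: t2).Nodup ↔ (y :: t2).Nodup := by
          rw [List.nodup_cons]
          exact ⟨fun h => h.2, fun h => ⟨hxnot, h⟩⟩
        have hzip : (((x :: y :: t2).zip ((x :: y :: t2).drop 1)).any (fun p => p.1 == p.2))
            = ((x == y) || ((y :: t2).zip ((y :: t2).drop 1)).any (fun p => p.1 == p.2)) := rfl
        rw [hzip, iht]
        simp [hxyeq, hnd]

-- ===== VERDICT (by name: the statement is the Claim_ definition above) =====
theorem Cap_Kha_Nang_An_spec : Claim_equal_Cap_Kha_Nang_An := by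
  intro niemtin _
  unfold Spec_Cap_Kha_Nang_An Cap_Kha_Nang_An Cap_Kha_Nang_An_alt
  simp only [List.flatMap_map]
  set vals := niemtin.flatMap (fun p => p.2.filter (fun v => decide ¬ v = 0)) with hvals
  have hinner : ∀ (cs : PySem.Dict Int Int) (p : Int × List Int),
      p.2.foldl (fun cs2 v => if v ≠ 0 then cs2.modify v 0 (· + 1) else cs2) cs
        = (p.2.filter (fun v => decide ¬ v = 0)).foldl (fun cs2 v => cs2.modify v 0 (· + 1)) cs := by
    intro cs p
    exact PySem.List.foldl_ite_eq_foldl_filter (p := fun v => v ≠ 0)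
      (f := fun cs2 v => cs2.modify v 0 (· + 1)) (l := p.2) (init := cs)
  have hcounts :
      niemtin.foldl (fun cs p =>
        p.2.foldl (fun cs2 v => if v ≠ 0 then cs2.modify v 0 (· + 1) else cs2) cs)
        PySem.Dict.empty
      = PySem.Dict.counter vals := by
    have hfg : (fun cs p => (p.2 : List Int).foldl
          (fun cs2 v => if v ≠ 0 then cs2.modify v 0 (· + 1) else cs2) cs)
        = (fun (cs : PySem.Dict Int Int) (p : Int × List Int) =>
            (p.2.filter (fun v => decide ¬ v = 0)).foldl (fun cs2 v => cs2.modify v 0 (· + 1)) cs) :=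
      funext fun cs => funext fun p => hinner cs p
    rw [hfg, foldl_foldl_eq_foldl_flatMap]
    rfl
  rw [hcounts, PySem.Dict.items_counter, List.any_map]
  simp only [Function.comp_def]
  rw [any_count_ge_two_eq vals]
  have hperm : (PySem.List.sorted vals (fun x => x) false).Perm vals :=
    PySem.List.sorted_perm ..
  rw [adj_eq_of_sorted _ (by simpa using PySem.List.sorted_pairwise vals (fun x => x))]
  simp [hperm.nodup_iff]
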